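-- pv_equiv track=rewrite | github.com/krzysztof-turowski/programming-contests | google-code-jam/2016-round-1b/getting_the_digits.py | solve
-- ===== SOURCE A (Python) =====
-- from collections import defaultdict
--
-- def solve(S):
--     names = [
--         'ZERO', 'ONE', 'TWO', 'THREE', 'FOUR', 'FIVE', 'SIX',
--         'SEVEN', 'EIGHT', 'NINE'
--     ]
--     order = [
--         { 'Z': 0, 'W': 2, 'U': 4, 'X': 6, 'G': 8 },
--         { 'O': 1, 'T': 3, 'F': 5, 'S': 7 },
--         { 'I': 9 }
--     ]
--     A, out = defaultdict(int), ''
--     for letter in S: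
--         A[letter] += 1
--     for row in order:
--         for letter, index in row.items():
--             if letter in A:
--                 value = A[letter]
--                 out += ''.join(str(index) * value)
--                 for other in names[index]:
--                     A[other] -= value
--                 del A[letter]
--     return ''.join(sorted(out))
-- ===== SOURCE B (Python) =====
-- def solve(S):
--     cnt = {}
--     for ch in S:
--         cnt[ch] = cnt.get(ch, 0) + 1
--     g = cnt.get
--     c = [0] * 10
--     c[0] = g('Z', 0)
--     c[2] = g('W', 0)
--     c[4] = g('U', 0)
--     c[6] = g('X', 0)
--     c[8] = g('G', 0)
--     c[1] = g('O', 0) - c[0] - c[2] - c[4]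
--     c[3] = g('T', 0) - c[2] - c[8]
--     c[5] = g('F', 0) - c[4]
--     c[7] = g('S', 0) - c[6]
--     c[9] = g('I', 0) - c[5] - c[6] - c[8]
--     return ''.join(str(d) * c[d] for d in range(10))
-- ===== Notes on version B (the rewrite author's own statement) =====
-- stated objective: simpler
-- what changed: A builds a defaultdict and greedily mutates it (emit, subtract the digit word's letters, delete the key) over three priority rows, then sorts the emitted digits; B counts each letter once and computes every digit's multiplicity by a fixed closed-form formula, emitting digits in ascending order with no dict mutation and no final sort.
import Mathlib
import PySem

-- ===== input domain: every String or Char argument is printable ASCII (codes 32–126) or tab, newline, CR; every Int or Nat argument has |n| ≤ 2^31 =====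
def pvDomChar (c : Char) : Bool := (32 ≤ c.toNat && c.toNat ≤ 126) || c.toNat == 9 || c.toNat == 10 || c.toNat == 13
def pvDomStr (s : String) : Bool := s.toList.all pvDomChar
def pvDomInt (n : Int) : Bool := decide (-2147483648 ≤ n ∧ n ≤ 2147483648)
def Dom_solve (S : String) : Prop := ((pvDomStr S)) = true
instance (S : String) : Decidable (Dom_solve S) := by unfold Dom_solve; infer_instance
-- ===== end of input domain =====

-- B replaces A's greedy dict-mutating subtraction loop (and final sort) by one letter count plus
-- ten closed-form digit formulas emitted in ascending order (objective: simpler).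

-- ===== PORT A =====
def solveNames : List String :=
  ["ZERO", "ONE", "TWO", "THREE", "FOUR", "FIVE", "SIX", "SEVEN", "EIGHT", "NINE"]

def solveOrder : List (List (Char × Int)) :=
  [[('Z', 0), ('W', 2), ('U', 4), ('X', 6), ('G', 8)],
   [('O', 1), ('T', 3), ('F', 5), ('S', 7)],
   [('I', 9)]]

-- body of A's 'for letter, index in row.items()' loop over the (dict, out) state
def solveStep (st : PySem.Dict Char Int × List Char) (li : Char × Int) :
    PySem.Dict Char Int × List Char :=
  if st.1.contains li.1 then
    let value := st.1.getD li.1 0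
    let out := st.2 ++ (List.replicate value.toNat (PySem.Int.toStr li.2).toList).flatten
    let A := ((PySem.List.pyGetD solveNames li.2 "").toList).foldl
      (fun d other => d.insert other (d.getD other 0 - value)) st.1
    (A.erase li.1, out)
  else st

def solve (S : String) : String :=
  let A0 : PySem.Dict Char Int :=
    S.toList.foldl (fun d c => d.modify c 0 (· + 1)) PySem.Dict.empty
  let fin := solveOrder.foldl (fun st row => row.foldl solveStep st) (A0, [])
  String.mk (PySem.List.sorted fin.2 (fun x => x) false)

-- ===== PORT B =====
def solve_alt (S : String) : String :=
  let cnt : PySem.Dict Char Int :=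
    S.toList.foldl (fun d ch => d.insert ch (d.getD ch 0 + 1)) PySem.Dict.empty
  let g : Char → Int := fun ch => cnt.getD ch 0
  let c0 := g 'Z'
  let c2 := g 'W'
  let c4 := g 'U'
  let c6 := g 'X'
  let c8 := g 'G'
  let c1 := g 'O' - c0 - c2 - c4
  let c3 := g 'T' - c2 - c8
  let c5 := g 'F' - c4
  let c7 := g 'S' - c6
  let c9 := g 'I' - c5 - c6 - c8
  let c := [c0, c1, c2, c3, c4, c5, c6, c7, c8, c9]
  String.mk (((PySem.List.pyRange 0 10 1).map
    (fun d => (List.replicate (PySem.List.pyGetD c d 0).toNat (PySem.Int.toStr d).toList).flatten)).flatten)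

-- ===== PRECONDITION & SPEC =====
def Spec_solve (S : String) (out : String) : Prop := out = solve_alt S
instance (S : String) (out : String) : Decidable (Spec_solve S out) := by unfold Spec_solve; infer_instance

-- ===== CLAIM (what is proved, stated in full; the proofs are below) =====
def Claim_equal_solve : Prop := ∀ (S : String), Dom_solve S → Spec_solve S (solve S)

-- ===== LEMMAS AND PROOFS =====

theorem get?_erase_self {κ ν : Type} [BEq κ] [LawfulBEq κ] (d : PySem.Dict κ ν) (k : κ) :
    (d.erase k).get? k = none := by
  simp [PySem.Dict.erase, PySem.Dict.get?, List.find?_eq_none]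

theorem get?_erase_of_ne {κ ν : Type} [BEq κ] [LawfulBEq κ] (d : PySem.Dict κ ν) (k k' : κ)
    (h : k' ≠ k) : (d.erase k).get? k' = d.get? k' := by
  show Option.map _ (List.find? _ (List.filter _ d.items)) = Option.map _ (List.find? _ d.items)
  congr 1
  induction d.items with
  | nil => rfl
  | cons p t ih =>
    by_cases hk : p.1 = k
    · simp [hk, Ne.symm h, ih]
    · cases hbe : p.1 == k' <;> simp [hk, hbe, ih]

theorem getD_erase {κ ν : Type} [BEq κ] [LawfulBEq κ] [DecidableEq κ] (d : PySem.Dict κ ν)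
    (k k' : κ) (d0 : ν) : (d.erase k).getD k' d0 = if k' = k then d0 else d.getD k' d0 := by
  by_cases h : k' = k
  · simp [h, PySem.Dict.getD_eq_get?_getD, get?_erase_self]
  · simp [h, PySem.Dict.getD_eq_get?_getD, get?_erase_of_ne d k k' h]

-- A's inner 'for other in names[index]: A[other] -= value' loop subtracts value once per occurrence
theorem getD_foldl_sub (cs : List Char) (D : PySem.Dict Char Int) (v : Int) (t : Char) :
    (cs.foldl (fun d o => d.insert o (d.getD o 0 - v)) D).getD t 0
      = D.getD t 0 - (cs.count t) * v := by
  induction cs generalizing D with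
  | nil => simp
  | cons c cs ih =>
    simp only [List.foldl_cons, ih, PySem.Dict.getD_insert, List.count_cons]
    by_cases h : t = c
    · simp [h]; ring
    · have hbe : ¬ (c == t) := by simp; exact fun hh => h hh.symm
      simp [h, hbe]

-- the out component of one step of A, branch-free (an absent key reads as 0 and emits nothing)
theorem step_out (st : PySem.Dict Char Int × List Char) (li : Char × Int) :
    (solveStep st li).2
      = st.2 ++ (List.replicate (st.1.getD li.1 0).toNat (PySem.Int.toStr li.2).toList).flatten := by
  unfold solveStep
  by_cases h : st.1.contains li.1
  · simp [h]
  · have h0 : st.1.getD li.1 0 = 0 := PySem.Dict.getD_of_not_contains st.1 0 (by simpa using h)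
    simp [h, h0]

-- the dict reads the later steps make, branch-free (the skipped branch subtracts 0)
theorem step_getD (st : PySem.Dict Char Int × List Char) (li : Char × Int) (t : Char)
    (h : ¬ t = li.1) :
    (solveStep st li).1.getD t 0
      = st.1.getD t 0
        - ((PySem.List.pyGetD solveNames li.2 "").toList.count t) * st.1.getD li.1 0 := by
  unfold solveStep
  by_cases hc : st.1.contains li.1
  · simp only [hc, if_true]
    rw [getD_erase, if_neg h, getD_foldl_sub]
  · have h0 : st.1.getD li.1 0 = 0 := PySem.Dict.getD_of_not_contains st.1 0 (by simpa using hc)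
    simp [hc, h0]

theorem toChars_dig0 : PySem.Int.toChars 0 = ['0'] := rfl
theorem toChars_dig1 : PySem.Int.toChars 1 = ['1'] := rfl
theorem toChars_dig2 : PySem.Int.toChars 2 = ['2'] := rfl
theorem toChars_dig3 : PySem.Int.toChars 3 = ['3'] := rfl
theorem toChars_dig4 : PySem.Int.toChars 4 = ['4'] := rfl
theorem toChars_dig5 : PySem.Int.toChars 5 = ['5'] := rfl
theorem toChars_dig6 : PySem.Int.toChars 6 = ['6'] := rfl
theorem toChars_dig7 : PySem.Int.toChars 7 = ['7'] := rfl
theorem toChars_dig8 : PySem.Int.toChars 8 = ['8'] := rfl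
theorem toChars_dig9 : PySem.Int.toChars 9 = ['9'] := rfl

-- sorting A's emission order (0,2,4,6,8,1,3,5,7,9) is B's ascending emission order
theorem sortedBlocks (n0 n1 n2 n3 n4 n5 n6 n7 n8 n9 : Nat) :
    PySem.List.sorted
      ((List.replicate n0 (PySem.Int.toChars 0)).flatten ++
        ((List.replicate n2 (PySem.Int.toChars 2)).flatten ++
          ((List.replicate n4 (PySem.Int.toChars 4)).flatten ++
            ((List.replicate n6 (PySem.Int.toChars 6)).flatten ++
              ((List.replicate n8 (PySem.Int.toChars 8)).flatten ++
                ((List.replicate n1 (PySem.Int.toChars 1)).flatten ++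
                  ((List.replicate n3 (PySem.Int.toChars 3)).flatten ++
                    ((List.replicate n5 (PySem.Int.toChars 5)).flatten ++
                      ((List.replicate n7 (PySem.Int.toChars 7)).flatten ++
                        (List.replicate n9 (PySem.Int.toChars 9)).flatten)))))))))
      (fun x => x) false
      = (List.replicate n0 (PySem.Int.toChars 0)).flatten ++
        ((List.replicate n1 (PySem.Int.toChars 1)).flatten ++
          ((List.replicate n2 (PySem.Int.toChars 2)).flatten ++
            ((List.replicate n3 (PySem.Int.toChars 3)).flatten ++
              ((List.replicate n4 (PySem.Int.toChars 4)).flatten ++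
                ((List.replicate n5 (PySem.Int.toChars 5)).flatten ++
                  ((List.replicate n6 (PySem.Int.toChars 6)).flatten ++
                    ((List.replicate n7 (PySem.Int.toChars 7)).flatten ++
                      ((List.replicate n8 (PySem.Int.toChars 8)).flatten ++
                        (List.replicate n9 (PySem.Int.toChars 9)).flatten)))))))) := by
  simp only [toChars_dig0, toChars_dig1, toChars_dig2, toChars_dig3, toChars_dig4, toChars_dig5,
    toChars_dig6, toChars_dig7, toChars_dig8, toChars_dig9, List.flatten_replicate_singleton]
  apply PySem.List.sorted_id_eq_of_perm_of_pairwise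
  · rw [← Multiset.coe_eq_coe]
    simp only [← Multiset.coe_add]
    abel
  · simp [List.pairwise_append, List.pairwise_replicate, List.mem_replicate] <;> aesop

-- ===== VERDICT (by name: the statement is the Claim_ definition above) =====
theorem solve_spec : Claim_equal_solve := by
  intro S _
  unfold Spec_solve solve solve_alt
  simp only [solveOrder, List.foldl_cons, List.foldl_nil]
  simp [step_out, step_getD, solveNames, PySem.List.pyGetD_ofNat',
        PySem.Dict.getD_foldl_modify_add_one, PySem.Dict.getD_foldl_insert_add_one,
        PySem.Dict.getD_empty,
        (by decide : PySem.List.pyRange 0 10 1 = ([0,1,2,3,4,5,6,7,8,9] : List Int))]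
  rw [sortedBlocks]
  congr <;> omega
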